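-- pv_equiv track=rewrite | github.com/gabogara/python_session_1_2 | class2.py | exclusive_elemts
-- ===== SOURCE A (Python) =====
-- def exclusive_elemts(lst1, lst2):
--     result = {}
--     combined = lst1 + lst2
--     arr_result = []
--
--     for elem in combined:
--         if elem in result:
--             result[elem] += 1
--         else:
--             result[elem] = 1
--
--     for key, value in result.items():
--         if value == 1:
--             arr_result.append(key)
--
--     return arr_result
-- ===== SOURCE B (Python) =====
-- def exclusive_elemts(lst1, lst2):
--     combined = lst1 + lst2
--     seen_once = set()
--     seen_multi = set()
--     for elem in combined:
--         if elem in seen_multi: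
--             continue
--         elif elem in seen_once:
--             seen_once.discard(elem)
--             seen_multi.add(elem)
--         else:
--             seen_once.add(elem)
--     return [elem for elem in combined if elem in seen_once]
-- ===== Notes on version B (the rewrite author's own statement) =====
-- stated objective: alternative
-- what changed: Replaces the count dictionary plus items() scan with a single pass maintaining two sets (seen once / seen more than once) and a second filtering pass over the combined list instead of over dict entries.
import Mathlib
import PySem

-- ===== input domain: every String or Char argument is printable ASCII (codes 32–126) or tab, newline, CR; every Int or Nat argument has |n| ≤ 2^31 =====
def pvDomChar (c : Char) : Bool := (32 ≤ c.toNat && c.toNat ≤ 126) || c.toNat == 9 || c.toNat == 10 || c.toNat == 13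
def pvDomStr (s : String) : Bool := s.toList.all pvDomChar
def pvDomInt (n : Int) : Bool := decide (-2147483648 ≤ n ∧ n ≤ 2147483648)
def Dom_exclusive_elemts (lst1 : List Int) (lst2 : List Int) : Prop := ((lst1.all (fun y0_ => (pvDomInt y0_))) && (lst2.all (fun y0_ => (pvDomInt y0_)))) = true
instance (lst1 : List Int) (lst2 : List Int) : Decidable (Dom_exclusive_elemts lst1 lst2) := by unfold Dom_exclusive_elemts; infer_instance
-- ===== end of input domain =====

-- B replaces the counting dictionary and its items() scan by a one-pass pair of sets
-- (seen once / seen more than once) and a second filtering pass over the combined list (alternative decomposition).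

-- ===== PORT A =====
def exclusive_elemts (lst1 : List Int) (lst2 : List Int) : List Int :=
  let combined := lst1 ++ lst2
  let result := combined.foldl
    (fun (d : PySem.Dict Int Int) elem =>
      if d.contains elem then d.insert elem (d.getD elem 0 + 1)
      else d.insert elem 1)
    PySem.Dict.empty
  result.items.foldl (fun acc kv => if kv.2 = 1 then acc ++ [kv.1] else acc) []

-- ===== PORT B =====
def exclusive_elemts_alt (lst1 : List Int) (lst2 : List Int) : List Int :=
  let combined := lst1 ++ lst2
  let st := combined.foldl
    (fun (p : PySem.Set Int × PySem.Set Int) elem =>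
      if PySem.Set.contains p.2 elem then p
      else if PySem.Set.contains p.1 elem then
        (PySem.Set.discard p.1 elem, PySem.Set.add p.2 elem)
      else (PySem.Set.add p.1 elem, p.2))
    (PySem.Set.empty, PySem.Set.empty)
  combined.filter (fun elem => PySem.Set.contains st.1 elem)

-- ===== PRECONDITION & SPEC =====
def Spec_exclusive_elemts (lst1 : List Int) (lst2 : List Int) (out : List Int) : Prop := out = exclusive_elemts_alt lst1 lst2
instance (lst1 : List Int) (lst2 : List Int) (out : List Int) : Decidable (Spec_exclusive_elemts lst1 lst2 out) := by unfold Spec_exclusive_elemts; infer_instance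

-- ===== CLAIM (what is proved, stated in full; the proofs are below) =====
def Claim_equal_exclusive_elemts : Prop := ∀ (lst1 : List Int) (lst2 : List Int), Dom_exclusive_elemts lst1 lst2 → Spec_exclusive_elemts lst1 lst2 (exclusive_elemts lst1 lst2)

-- ===== LEMMAS AND PROOFS =====

-- A's dict step equals the counter step.
theorem aStep_eq : (fun (d : PySem.Dict Int Int) elem =>
      if d.contains elem then d.insert elem (d.getD elem 0 + 1)
      else d.insert elem 1)
    = fun (d : PySem.Dict Int Int) x => d.insert x (d.getD x 0 + 1) := by
  funext d x
  by_cases h : d.contains x = true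
  · simp [h]
  · have h' : d.contains x = false := by simpa using h
    rw [if_neg (by simp [h']), PySem.Dict.getD_of_not_contains d 0 h']
    norm_num

-- B's state invariant: after folding l, the first set holds the elements of count 1, the second those of count >= 2.
theorem bInv (l : List Int) :
    ∀ x : Int,
      (x ∈ (l.foldl
        (fun (p : PySem.Set Int × PySem.Set Int) elem =>
          if PySem.Set.contains p.2 elem then p
          else if PySem.Set.contains p.1 elem then
            (PySem.Set.discard p.1 elem, PySem.Set.add p.2 elem)
          else (PySem.Set.add p.1 elem, p.2))
        (PySem.Set.empty, PySem.Set.empty)).1 ↔ l.count x = 1)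
      ∧ (x ∈ (l.foldl
        (fun (p : PySem.Set Int × PySem.Set Int) elem =>
          if PySem.Set.contains p.2 elem then p
          else if PySem.Set.contains p.1 elem then
            (PySem.Set.discard p.1 elem, PySem.Set.add p.2 elem)
          else (PySem.Set.add p.1 elem, p.2))
        (PySem.Set.empty, PySem.Set.empty)).2 ↔ 2 ≤ l.count x) := by
  induction l using List.reverseRecOn with
  | nil => intro x; simp [PySem.Set.empty]
  | append_singleton l a ih =>
    intro x
    rw [List.foldl_append]
    simp only [List.foldl_cons, List.foldl_nil]
    obtain ⟨i1x, i2x⟩ := ih x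
    obtain ⟨i1a, i2a⟩ := ih a
    set s := List.foldl
        (fun (p : PySem.Set Int × PySem.Set Int) elem =>
          if PySem.Set.contains p.2 elem then p
          else if PySem.Set.contains p.1 elem then
            (PySem.Set.discard p.1 elem, PySem.Set.add p.2 elem)
          else (PySem.Set.add p.1 elem, p.2))
        (PySem.Set.empty, PySem.Set.empty) l with hs
    have cnt : (l ++ [a]).count x = l.count x + (if x = a then 1 else 0) := by
      by_cases hx : x = a
      · subst hx; simp [List.count_append]
      · rw [if_neg hx, add_zero, List.count_append,
            List.count_eq_zero.mpr (show x ∉ [a] by simp [hx]), add_zero]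
    rw [cnt]
    by_cases hm : PySem.Set.contains s.2 a = true
    · have ha2 : 2 ≤ l.count a := i2a.mp ((PySem.Set.contains_iff _ _).mp hm)
      simp only [hm, if_true]
      by_cases hx : x = a
      · subst hx
        refine ⟨?_, ?_⟩
        · rw [i1x, if_pos rfl]; omega
        · rw [i2x, if_pos rfl]; omega
      · simp only [if_neg hx, add_zero]
        exact ⟨i1x, i2x⟩
    · have hm' : PySem.Set.contains s.2 a = false := by simpa using hm
      simp only [hm', Bool.false_eq_true, if_false]
      have hna2 : ¬ 2 ≤ l.count a := fun h => by
        rw [(PySem.Set.contains_iff _ _).mpr (i2a.mpr h)] at hm'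
        simp at hm'
      by_cases ho : PySem.Set.contains s.1 a = true
      · have ha1 : l.count a = 1 := i1a.mp ((PySem.Set.contains_iff _ _).mp ho)
        simp only [ho, if_true]
        by_cases hx : x = a
        · subst hx
          refine ⟨?_, ?_⟩
          · rw [PySem.Set.mem_discard, if_pos rfl]
            simp [ha1]
          · rw [PySem.Set.mem_add, if_pos rfl]
            simp [i2a, ha1]
        · simp only [if_neg hx, add_zero]
          refine ⟨?_, ?_⟩
          · rw [PySem.Set.mem_discard]
            simp [hx, i1x]
          · rw [PySem.Set.mem_add]
            simp [hx, i2x]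
      · have ho' : PySem.Set.contains s.1 a = false := by simpa using ho
        have hna1 : l.count a ≠ 1 := fun h => by
          rw [(PySem.Set.contains_iff _ _).mpr (i1a.mpr h)] at ho'
          simp at ho'
        have hz : l.count a = 0 := by omega
        simp only [ho', Bool.false_eq_true, if_false]
        by_cases hx : x = a
        · subst hx
          refine ⟨?_, ?_⟩
          · rw [PySem.Set.mem_add, if_pos rfl]
            simp [i1a, hz]
          · rw [i2x, if_pos rfl]; omega
        · simp only [if_neg hx, add_zero]
          refine ⟨?_, ?_⟩
          · rw [PySem.Set.mem_add]
            simp [hx, i1x]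
          · exact i2x

-- first-occurrence dedup filtered by a count-at-most-1 predicate equals the plain filter
theorem dedup_filter_count (p : Int → Bool) :
    ∀ l : List Int, (∀ x, p x = true → l.count x ≤ 1) →
      (PySem.Set.ofList l).filter p = l.filter p := by
  intro l
  induction l using List.reverseRecOn with
  | nil => intro _; simp [PySem.Set.ofList]
  | append_singleton l a ih =>
    intro h
    have hsub : ∀ x, p x = true → l.count x ≤ 1 := by
      intro x hx
      have := h x hx
      simp [List.count_append] at this
      omega
    rw [PySem.Set.ofList_append_singleton]
    by_cases hm : a ∈ l
    · have hpa : p a = false := by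
        rw [Bool.eq_false_iff]; intro hp
        have := h a hp
        have h1 : 1 ≤ l.count a := List.one_le_count_iff.mpr hm
        simp [List.count_append] at this
        omega
      rw [PySem.Set.add_of_mem ((PySem.Set.mem_ofList _ _).mpr hm)]
      rw [ih hsub, List.filter_append]
      simp [hpa]
    · have hnm : a ∉ PySem.Set.ofList l := fun h' => hm ((PySem.Set.mem_ofList _ _).mp h')
      rw [PySem.Set.add_of_not_mem hnm, List.filter_append, List.filter_append, ih hsub]

-- A's output is the first-occurrence dedup filtered on count = 1.
theorem a_char (c : List Int) :
    (c.foldl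
      (fun (d : PySem.Dict Int Int) elem =>
        if d.contains elem then d.insert elem (d.getD elem 0 + 1)
        else d.insert elem 1)
      PySem.Dict.empty).items.foldl (fun acc kv => if kv.2 = 1 then acc ++ [kv.1] else acc) []
    = (PySem.Set.ofList c).filter (fun k => decide ((c.count k : Int) = 1)) := by
  rw [aStep_eq, PySem.Dict.foldl_insert_getD_add_one_eq_counter, PySem.List.foldl_append_ite]
  rw [PySem.Dict.items_counter, List.filter_map, List.map_map]
  simp [Function.comp_def]

-- ===== VERDICT (by name: the statement is the Claim_ definition above) =====
theorem exclusive_elemts_spec : Claim_equal_exclusive_elemts := by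
  intro lst1 lst2 _
  unfold Spec_exclusive_elemts exclusive_elemts exclusive_elemts_alt
  set c := lst1 ++ lst2 with hc
  rw [a_char c]
  have hB : c.filter (fun elem =>
      PySem.Set.contains (c.foldl
        (fun (p : PySem.Set Int × PySem.Set Int) elem =>
          if PySem.Set.contains p.2 elem then p
          else if PySem.Set.contains p.1 elem then
            (PySem.Set.discard p.1 elem, PySem.Set.add p.2 elem)
          else (PySem.Set.add p.1 elem, p.2))
        (PySem.Set.empty, PySem.Set.empty)).1 elem)
      = c.filter (fun k => decide ((c.count k : Int) = 1)) := by
    apply List.filter_congr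
    intro x _
    have h1 := (bInv c x).1
    rw [Bool.eq_iff_iff, PySem.Set.contains_iff, h1]
    constructor
    · intro h; simp [h]
    · intro h; simp at h; omega
  rw [hB]
  apply dedup_filter_count
  intro x hx
  simp at hx
  omega
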